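-- pv_equiv track=rewrite | github.com/pypi-data/pypi-mirror-401 | packages/pulka/pulka-0.3.0-py3-none-any.whl/pulka/core/engine/duckdb_adapter.py | _normalize_duckdb_dtype_text
-- ===== SOURCE A (Python) =====
-- from typing import Any
--
-- def _normalize_duckdb_dtype_text(dtype: Any) -> str:
--     if dtype is None:
--         return ""
--     text = str(dtype).strip().lower()
--     for delimiter in ("(", "[", "<"):
--         if delimiter in text:
--             text = text.split(delimiter, 1)[0]
--     return text.strip()
-- ===== SOURCE B (Python) =====
-- def _normalize_duckdb_dtype_text(dtype):
--     if dtype is None: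
--         return ""
--     text = str(dtype).strip().lower()
--     kept = []
--     for ch in text:
--         if ch in "([<":
--             break
--         kept.append(ch)
--     return "".join(kept).strip()
-- ===== Notes on version B (the rewrite author's own statement) =====
-- stated objective: simpler
-- what changed: Replaces A's three sequential split-at-delimiter passes (membership test then split, once per delimiter) with a single left-to-right character scan that collects characters until it reaches the first delimiter.
import Mathlib
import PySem

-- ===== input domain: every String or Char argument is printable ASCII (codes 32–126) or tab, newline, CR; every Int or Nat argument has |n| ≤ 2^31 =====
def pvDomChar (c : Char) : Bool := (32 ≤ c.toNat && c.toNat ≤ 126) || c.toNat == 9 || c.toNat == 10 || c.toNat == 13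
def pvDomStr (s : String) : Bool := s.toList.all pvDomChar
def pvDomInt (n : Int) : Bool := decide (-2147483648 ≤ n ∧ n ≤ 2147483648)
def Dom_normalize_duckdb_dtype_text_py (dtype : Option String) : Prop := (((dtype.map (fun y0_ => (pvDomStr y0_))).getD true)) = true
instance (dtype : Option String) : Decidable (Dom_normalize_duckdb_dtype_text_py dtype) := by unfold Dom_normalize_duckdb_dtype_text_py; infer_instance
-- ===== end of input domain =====

-- B replaces A's three sequential "if delimiter in text: split and keep the first piece"
-- passes by one left-to-right scan that stops at the first delimiter (objective: simpler).

-- ===== PORT A =====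
-- text.split(d, 1)[0]: split(d,1) with a non-empty separator always returns a non-empty
-- list (never raises), so [0] is its head; getD []/headD "" are never the defaults.
def normalize_duckdb_dtype_text_py (dtype : Option String) : String :=
  match dtype with
  | none => ""
  | some s =>
    let text := PySem.Str.lower (PySem.Str.strip s)
    let text := ["(", "[", "<"].foldl
      (fun t d => if PySem.Str.isIn d t then ((PySem.Str.splitMax? t d 1).getD []).headD "" else t)
      text
    PySem.Str.strip text

-- ===== PORT B =====
-- Source B's "for ch in text: if ch in '([<': break; kept.append(ch)" is List.takeWhile;
-- ''.join(kept) is String.ofList.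
def normalize_duckdb_dtype_text_py_alt (dtype : Option String) : String :=
  match dtype with
  | none => ""
  | some s =>
    let text := PySem.Str.lower (PySem.Str.strip s)
    let kept := text.toList.takeWhile (fun c => !(c == '(' || c == '[' || c == '<'))
    PySem.Str.strip (String.ofList kept)

-- ===== PRECONDITION & SPEC =====
def Spec_normalize_duckdb_dtype_text_py (dtype : Option String) (out : String) : Prop := out = normalize_duckdb_dtype_text_py_alt dtype
instance (dtype : Option String) (out : String) : Decidable (Spec_normalize_duckdb_dtype_text_py dtype out) := by unfold Spec_normalize_duckdb_dtype_text_py; infer_instance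

-- ===== CLAIM (what is proved, stated in full; the proofs are below) =====
def Claim_equal_normalize_duckdb_dtype_text_py : Prop := ∀ (dtype : Option String), Dom_normalize_duckdb_dtype_text_py dtype → Spec_normalize_duckdb_dtype_text_py dtype (normalize_duckdb_dtype_text_py dtype)

-- ===== LEMMAS AND PROOFS =====

-- With the split budget exhausted (m = 0), go returns the rest as the final piece.
theorem pv_go_m0 (sep : List Char) (fuel : Nat) (l cur : List Char) (acc : List (List Char)) :
    PySem.Chars.splitOnMax.go sep fuel 0 l cur acc = ((cur.reverse ++ l) :: acc).reverse := by
  cases fuel with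
  | zero => simp [PySem.Chars.splitOnMax.go]
  | succ f => cases l with
    | nil => simp [PySem.Chars.splitOnMax.go]
    | cons c rest => simp [PySem.Chars.splitOnMax.go]

-- With budget 1 and a single-char separator, the first emitted piece is the prefix
-- of l before the first occurrence of d.
theorem pv_go_first (d : Char) :
    ∀ (l : List Char) (fuel : Nat) (cur : List Char) (acc : List (List Char)), l.length < fuel →
      ∃ rest, PySem.Chars.splitOnMax.go [d] fuel 1 l cur acc
        = acc.reverse ++ (cur.reverse ++ l.takeWhile (fun c => !(c == d))) :: rest := by
  intro l
  induction l with
  | nil =>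
    intro fuel cur acc h
    cases fuel with
    | zero => omega
    | succ f => exact ⟨[], by simp [PySem.Chars.splitOnMax.go]⟩
  | cons c tl ih =>
    intro fuel cur acc h
    cases fuel with
    | zero => omega
    | succ f =>
      by_cases hd : c = d
      · refine ⟨[List.drop 1 (c :: tl)], ?_⟩
        have hpre : [d].isPrefixOf (c :: tl) = true := by simp [hd, List.isPrefixOf]
        simp [PySem.Chars.splitOnMax.go, pv_go_m0, hd, List.takeWhile]
      · have hpre : [d].isPrefixOf (c :: tl) = false := by
          simp [List.isPrefixOf]; exact fun h' => hd h'.symm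
        obtain ⟨rest, hrest⟩ := ih f (c :: cur) acc (by simp at h; omega)
        refine ⟨rest, ?_⟩
        simp only [PySem.Chars.splitOnMax.go, hpre]
        simp only [hrest, List.takeWhile]
        have hcd : (c == d) = false := by simp [hd]
        simp [hcd]

-- takeWhile keeps everything when the stopper never occurs.
theorem pv_takeWhile_of_not_mem (d : Char) (l : List Char) (h : d ∉ l) :
    l.takeWhile (fun c => !(c == d)) = l := by
  induction l with
  | nil => rfl
  | cons c tl ih =>
    simp at h
    have hcd : (c == d) = false := by simp; exact fun e => h.1 e.symm
    simp [List.takeWhile, hcd, ih h.2]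

-- One pass of A's loop body equals cutting at the first occurrence of d.
theorem pv_stepA (sep : String) (d : Char) (hsep : sep.toList = [d]) (t : String) :
    (if PySem.Str.isIn sep t then ((PySem.Str.splitMax? t sep 1).getD []).headD "" else t)
      = String.ofList (t.toList.takeWhile (fun c => !(c == d))) := by
  obtain ⟨rest, hrest⟩ := pv_go_first d t.toList (t.toList.length + 1) [] [] (by omega)
  have hsplit : PySem.Chars.splitOnMax t.toList [d] 1
      = (t.toList.takeWhile (fun c => !(c == d))) :: rest := by
    simpa [PySem.Chars.splitOnMax] using hrest
  by_cases hin : PySem.Str.isIn sep t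
  · simp only [hin, if_pos]
    simp [PySem.Str.splitMax?, PySem.Chars.splitMax?, hsep, hsplit]
  · simp only [hin, if_neg, Bool.not_eq_true]
    have hnm : d ∉ t.toList := by
      intro hm
      apply hin
      rw [show PySem.Str.isIn sep t = PySem.Chars.isIn sep.toList t.toList from rfl, hsep,
        PySem.Chars.isIn_iff_infix]
      obtain ⟨s1, s2, hsplit2⟩ := List.append_of_mem hm
      exact ⟨s1, s2, by simp [hsplit2]⟩
    rw [pv_takeWhile_of_not_mem d t.toList hnm, String.ofList_toList]

-- ===== VERDICT (by name: the statement is the Claim_ definition above) =====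
theorem pv_toList_par : ("(" : String).toList = ['('] := rfl
theorem pv_toList_brk : ("[" : String).toList = ['['] := rfl
theorem pv_toList_ang : ("<" : String).toList = ['<'] := rfl

-- A's three-pass delimiter loop equals B's single takeWhile scan.
theorem pv_core (text : String) :
    ["(", "[", "<"].foldl
      (fun t d => if PySem.Str.isIn d t then ((PySem.Str.splitMax? t d 1).getD []).headD "" else t)
      text
      = String.ofList (text.toList.takeWhile (fun c => !(c == '(' || c == '[' || c == '<'))) := by
  simp only [List.foldl_cons, List.foldl_nil]
  rw [pv_stepA "(" '(' pv_toList_par, pv_stepA "[" '[' pv_toList_brk,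
    pv_stepA "<" '<' pv_toList_ang]
  rw [String.toList_ofList, String.toList_ofList, List.takeWhile_takeWhile,
    List.takeWhile_takeWhile]
  congr 1
  congr 1
  funext c
  by_cases h1 : c = '(' <;> by_cases h2 : c = '[' <;> by_cases h3 : c = '<' <;>
    simp [h1, h2, h3]

-- ===== VERDICT (by name: the statement is the Claim_ definition above) =====
theorem normalize_duckdb_dtype_text_py_spec : Claim_equal_normalize_duckdb_dtype_text_py := by
  intro dtype _
  unfold Spec_normalize_duckdb_dtype_text_py
  cases dtype with
  | none => rfl
  | some s =>
    show PySem.Str.strip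
        (["(", "[", "<"].foldl
          (fun t d => if PySem.Str.isIn d t then ((PySem.Str.splitMax? t d 1).getD []).headD "" else t)
          (PySem.Str.lower (PySem.Str.strip s)))
      = PySem.Str.strip (String.ofList
          ((PySem.Str.lower (PySem.Str.strip s)).toList.takeWhile
            (fun c => !(c == '(' || c == '[' || c == '<'))))
    rw [pv_core]
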